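-- pv_equiv track=rewrite | github.com/rbtkhn/grace-mar | scripts/export.py | _argv_has_user_flag
-- ===== SOURCE A (Python) =====
-- def _argv_has_user_flag(argv: list[str]) -> bool:
--     i = 0
--     while i < len(argv):
--         if argv[i] in ("-u", "--user"):
--             return True
--         if argv[i] == "--":
--             break
--         i += 1
--     return False
-- ===== SOURCE B (Python) =====
-- def _argv_has_user_flag(argv: list[str]) -> bool:
--     cut = argv.index("--") if "--" in argv else len(argv)
--     head = argv[:cut]
--     return "-u" in head or "--user" in head
-- ===== Notes on version B (the rewrite author's own statement) =====
-- stated objective: idiomatic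
-- what changed: Replaces the interleaved index-based while loop (testing the flags and the '--' terminator on each step) with a two-phase decomposition: first compute the boundary via index('--'), then two membership tests over the sliced head.
import Mathlib
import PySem

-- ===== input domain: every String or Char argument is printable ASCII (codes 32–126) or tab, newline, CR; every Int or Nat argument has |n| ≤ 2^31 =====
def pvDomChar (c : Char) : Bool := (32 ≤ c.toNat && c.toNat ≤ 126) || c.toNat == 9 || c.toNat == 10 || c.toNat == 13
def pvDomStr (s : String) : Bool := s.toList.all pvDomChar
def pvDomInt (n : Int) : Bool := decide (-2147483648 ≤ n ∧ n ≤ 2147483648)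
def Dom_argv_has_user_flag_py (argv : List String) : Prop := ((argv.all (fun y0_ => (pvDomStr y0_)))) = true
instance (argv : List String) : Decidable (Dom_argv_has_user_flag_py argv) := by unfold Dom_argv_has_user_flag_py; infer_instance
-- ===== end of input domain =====

-- B replaces A's interleaved while loop with a two-phase decomposition (find the '--' boundary, then membership tests on the sliced head); objective: more idiomatic, same O(n) cost.


-- ===== PORT A =====
-- while loop over index i: structural recursion over the remaining suffix, branches in source order
def argvLoopA : List String → Bool
  | [] => false
  | x :: xs =>
    if x = "-u" ∨ x = "--user" then true
    else if x = "--" then false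
    else argvLoopA xs

def argv_has_user_flag_py (argv : List String) : Bool := argvLoopA argv

-- ===== PORT B =====
def argv_has_user_flag_py_alt (argv : List String) : Bool :=
  let cut : Int :=
    match PySem.List.index? argv "--" with
    | some i => (i : Int)
    | none => (argv.length : Int)
  let head := PySem.List.slice argv none (some cut)
  head.contains "-u" || head.contains "--user"

-- ===== PRECONDITION & SPEC =====
def Spec_argv_has_user_flag_py (argv : List String) (out : Bool) : Prop := out = argv_has_user_flag_py_alt argv
instance (argv : List String) (out : Bool) : Decidable (Spec_argv_has_user_flag_py argv out) := by unfold Spec_argv_has_user_flag_py; infer_instance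

-- ===== CLAIM (what is proved, stated in full; the proofs are below) =====
def Claim_equal_argv_has_user_flag_py : Prop := ∀ (argv : List String), Dom_argv_has_user_flag_py argv → Spec_argv_has_user_flag_py argv (argv_has_user_flag_py argv)

-- ===== LEMMAS AND PROOFS =====

theorem alt_take (argv : List String) :
    argv_has_user_flag_py_alt argv =
      ((argv.take ((PySem.List.index? argv "--").getD argv.length)).contains "-u" ||
       (argv.take ((PySem.List.index? argv "--").getD argv.length)).contains "--user") := by
  simp only [argv_has_user_flag_py_alt]
  cases h : PySem.List.index? argv "--" with
  | none => simp [PySem.List.slice_to_natCast]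
  | some i => simp [PySem.List.slice_to_natCast]

theorem alt_eq_loop (argv : List String) : argv_has_user_flag_py_alt argv = argvLoopA argv := by
  induction argv with
  | nil => simp [alt_take, argvLoopA]
  | cons x xs ih =>
    rw [alt_take]
    by_cases hdd : x = "--"
    · subst hdd
      rw [PySem.List.index?_cons_self]
      simp [argvLoopA]
    · have hidx := PySem.List.index?_cons_of_ne (xs := xs) (v := "--") hdd
      have htake : (x :: xs).take ((PySem.List.index? (x :: xs) "--").getD (x :: xs).length)
          = x :: xs.take ((PySem.List.index? xs "--").getD xs.length) := by
        rw [hidx]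
        cases h : PySem.List.index? xs "--" <;> simp
      rw [htake]
      by_cases hu : x = "-u" ∨ x = "--user"
      · have : argvLoopA (x :: xs) = true := by
          simp only [argvLoopA]
          rcases hu with hu | hu <;> simp [hu]
        rw [this]
        rcases hu with hu | hu <;> simp [hu]
      · rw [not_or] at hu
        have hloop : argvLoopA (x :: xs) = argvLoopA xs := by
          simp [argvLoopA, hu.1, hu.2, hdd]
        rw [hloop, ← ih, alt_take]
        simp [Ne.symm hu.1, Ne.symm hu.2]

-- ===== VERDICT =====
theorem argv_has_user_flag_py_spec : Claim_equal_argv_has_user_flag_py := by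
  intro argv _
  unfold Spec_argv_has_user_flag_py argv_has_user_flag_py
  exact (alt_eq_loop argv).symm
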